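-- pv_equiv track=rewrite | github.com/BrianDeJesus/karnaugh-mapper | bool_algebra.py | get_counts
-- ===== SOURCE A (Python) =====
-- def get_counts(lst, a_count, b_count, c_count, d_count):
--     for item in lst:
--         if item == 'A':
--             a_count += 1
--         elif item == 'A\'':
--             a_count -= 1
--         elif item == 'B':
--             b_count += 1
--         elif item == 'B\'':
--             b_count -= 1
--         elif item == 'C':
--             c_count += 1
--         elif item == 'C\'':
--             c_count -= 1
--         elif item == 'D':
--             d_count += 1
--         elif item == 'D\'':
--             d_count -= 1
--     return a_count, b_count, c_count, d_count
-- ===== SOURCE B (Python) =====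
-- def get_counts(lst, a_count, b_count, c_count, d_count):
--     # closed-form: one count per token instead of a branching loop
--     return (a_count + lst.count('A') - lst.count("A'"),
--             b_count + lst.count('B') - lst.count("B'"),
--             c_count + lst.count('C') - lst.count("C'"),
--             d_count + lst.count('D') - lst.count("D'"))
-- ===== Notes on version B (the rewrite author's own statement) =====
-- stated objective: idiomatic
-- what changed: Replaced the 8-way if/elif accumulator loop by a closed-form expression: each signed tally is the initial count plus list.count of the positive token minus list.count of the negated token.
import Mathlib
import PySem

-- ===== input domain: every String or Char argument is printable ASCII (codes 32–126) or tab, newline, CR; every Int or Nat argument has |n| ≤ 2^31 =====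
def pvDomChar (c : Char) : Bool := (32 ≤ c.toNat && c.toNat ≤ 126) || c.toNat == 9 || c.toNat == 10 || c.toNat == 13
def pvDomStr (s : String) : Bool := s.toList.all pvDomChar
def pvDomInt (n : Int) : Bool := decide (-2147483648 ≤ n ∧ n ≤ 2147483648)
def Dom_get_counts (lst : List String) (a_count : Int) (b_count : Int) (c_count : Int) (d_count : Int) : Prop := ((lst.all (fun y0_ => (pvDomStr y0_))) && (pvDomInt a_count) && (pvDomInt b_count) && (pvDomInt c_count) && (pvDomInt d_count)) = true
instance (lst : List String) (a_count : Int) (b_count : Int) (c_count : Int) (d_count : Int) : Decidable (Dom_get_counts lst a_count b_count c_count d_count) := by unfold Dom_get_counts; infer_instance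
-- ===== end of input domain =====

-- B replaces A's 8-way if/elif loop by a closed form: initial count plus list.count of
-- the positive token minus list.count of the negated token, per variable (idiomatic).

-- ===== PORT A =====
-- A's for-loop over lst, threading the four accumulators; branches in A's order.
def get_counts : List String → Int → Int → Int → Int → Int × Int × Int × Int
  | [], a_count, b_count, c_count, d_count => (a_count, b_count, c_count, d_count)
  | item :: rest, a_count, b_count, c_count, d_count =>
    if item == "A" then get_counts rest (a_count + 1) b_count c_count d_count
    else if item == "A'" then get_counts rest (a_count - 1) b_count c_count d_count
    else if item == "B" then get_counts rest a_count (b_count + 1) c_count d_count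
    else if item == "B'" then get_counts rest a_count (b_count - 1) c_count d_count
    else if item == "C" then get_counts rest a_count b_count (c_count + 1) d_count
    else if item == "C'" then get_counts rest a_count b_count (c_count - 1) d_count
    else if item == "D" then get_counts rest a_count b_count c_count (d_count + 1)
    else if item == "D'" then get_counts rest a_count b_count c_count (d_count - 1)
    else get_counts rest a_count b_count c_count d_count

-- ===== PORT B =====
def get_counts_alt (lst : List String) (a_count : Int) (b_count : Int) (c_count : Int) (d_count : Int) : Int × Int × Int × Int :=
  (a_count + (PySem.List.count lst "A" : Int) - (PySem.List.count lst "A'" : Int),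
   b_count + (PySem.List.count lst "B" : Int) - (PySem.List.count lst "B'" : Int),
   c_count + (PySem.List.count lst "C" : Int) - (PySem.List.count lst "C'" : Int),
   d_count + (PySem.List.count lst "D" : Int) - (PySem.List.count lst "D'" : Int))

-- ===== PRECONDITION & SPEC =====
def Spec_get_counts (lst : List String) (a_count : Int) (b_count : Int) (c_count : Int) (d_count : Int) (out : Int × Int × Int × Int) : Prop := out = get_counts_alt lst a_count b_count c_count d_count
instance (lst : List String) (a_count : Int) (b_count : Int) (c_count : Int) (d_count : Int) (out : Int × Int × Int × Int) : Decidable (Spec_get_counts lst a_count b_count c_count d_count out) := by unfold Spec_get_counts; infer_instance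

-- ===== CLAIM (what is proved, stated in full; the proofs are below) =====
def Claim_equal_get_counts : Prop := ∀ (lst : List String) (a_count : Int) (b_count : Int) (c_count : Int) (d_count : Int), Dom_get_counts lst a_count b_count c_count d_count → Spec_get_counts lst a_count b_count c_count d_count (get_counts lst a_count b_count c_count d_count)

-- ===== LEMMAS AND PROOFS =====

-- Loop invariant: A's loop equals the closed form, for any initial accumulators.
theorem get_counts_eq_alt (lst : List String) (a b c d : Int) :
    get_counts lst a b c d = get_counts_alt lst a b c d := by
  induction lst generalizing a b c d with
  | nil => simp [get_counts, get_counts_alt, PySem.List.count]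
  | cons h t ih =>
    simp only [get_counts]
    split_ifs with h1 h2 h3 h4 h5 h6 h7 h8 <;>
      rw [ih] <;>
      simp_all [get_counts_alt, PySem.List.count, List.count_cons] <;> omega

-- ===== VERDICT (by name: the statement is the Claim_ definition above) =====
theorem get_counts_spec : Claim_equal_get_counts := by
  intro lst a b c d _
  exact get_counts_eq_alt lst a b c d
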